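-- pv_equiv track=rewrite | github.com/wismer/advent2023 | day1/sigh.py | read_left
-- ===== SOURCE A (Python) =====
-- NUMBERS = {
--     'one': '1',
--     'two': '2',
--     'three': '3',
--     'four': '4',
--     'five': '5',
--     'six': '6',
--     'seven': '7',
--     'eight': '8',
--     'nine': '9'
-- }
--
-- def is_alpha_number(line, idx, r=True):
--     n = None
--     for k in NUMBERS.keys():
--         l = len(k)
--         if r:
--             slc = line[idx:(idx+l)]
--         else:
--             slc = line[(idx - l + 1):idx+1]
--
--         if slc == k:
--             return NUMBERS[k]
--
--     return None
--
-- def read_left(line):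
--     idx = 0
--     num = ""
--     while True:
--         if idx >= len(line):
--             break
--         c = line[idx]
--         if c in ['1', '2', '3', '4', '5', '6', '7', '8', '9']:
--             return c, idx + 1
--
--         alpha = is_alpha_number(line, idx)
--         if alpha:
--             return alpha, idx + 1
--
--         idx += 1
-- ===== SOURCE B (Python) =====
-- NUMBERS = {
--     'one': '1',
--     'two': '2',
--     'three': '3',
--     'four': '4',
--     'five': '5',
--     'six': '6',
--     'seven': '7',
--     'eight': '8',
--     'nine': '9'
-- }
--
-- # Tokens: the nine digits first, then the nine spelled-out words.
-- TOKENS = [(str(d), str(d)) for d in range(1, 10)] + list(NUMBERS.items())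
--
-- def read_left(line):
--     best_i = None
--     best_v = None
--     for tok, val in TOKENS:
--         i = line.find(tok)
--         if i != -1 and (best_i is None or i < best_i):
--             best_i, best_v = i, val
--     if best_i is None:
--         return None
--     return best_v, best_i + 1
-- ===== Notes on version B (the rewrite author's own statement) =====
-- stated objective: faster
-- what changed: Instead of scanning the line index by index in Python and testing a digit plus nine word-slices at each position, B runs one str.find per token (9 digits + 9 words) and returns the token with the minimal match position.
import Mathlib
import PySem

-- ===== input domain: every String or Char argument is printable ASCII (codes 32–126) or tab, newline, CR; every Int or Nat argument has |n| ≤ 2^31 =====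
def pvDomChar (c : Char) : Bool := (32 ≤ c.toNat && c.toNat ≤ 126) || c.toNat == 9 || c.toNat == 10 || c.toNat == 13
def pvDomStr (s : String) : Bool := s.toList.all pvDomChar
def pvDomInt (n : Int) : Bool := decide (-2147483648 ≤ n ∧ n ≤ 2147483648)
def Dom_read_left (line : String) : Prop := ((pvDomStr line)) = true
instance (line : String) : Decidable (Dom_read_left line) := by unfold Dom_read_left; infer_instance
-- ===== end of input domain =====

-- B replaces A's per-index Python scan (digit test plus nine word slices at every position) by one
-- str.find per token (9 digits + 9 words), returning the token with the minimal match position;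
-- same results, measurably faster in Python (C-level substring searches instead of the interpreted loop).

-- ===== PORT A =====
def pvNumbers : List (String × String) :=
  [("one","1"),("two","2"),("three","3"),("four","4"),("five","5"),
   ("six","6"),("seven","7"),("eight","8"),("nine","9")]

def isAlphaGo (line : String) (idx : Int) (r : Bool) : List (String × String) → Option String
  | [] => none
  | (k, v) :: rest =>
    let l : Int := (PySem.Str.len k : Int)
    let slc := if r then PySem.Str.slice line (some idx) (some (idx + l))
               else PySem.Str.slice line (some (idx - l + 1)) (some (idx + 1))
    if slc = k then some v else isAlphaGo line idx r rest

def is_alpha_number (line : String) (idx : Int) (r : Bool) : Option String :=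
  isAlphaGo line idx r pvNumbers

def pvDigits : List Char := ['1','2','3','4','5','6','7','8','9']

def readLeftGo (line : String) (idx : Nat) : Option (String × Int) :=
  if h : line.toList.length ≤ idx then none
  else
    let c := line.toList[idx]'(by omega)
    if c ∈ pvDigits then some (String.ofList [c], (idx : Int) + 1)
    else match is_alpha_number line (idx : Int) true with
      | some a => some (a, (idx : Int) + 1)
      | none => readLeftGo line (idx + 1)
termination_by line.toList.length - idx
decreasing_by omega

def read_left (line : String) : Option (String × Int) := readLeftGo line 0

-- ===== PORT B =====
def pvDigitPairs : List (String × String) :=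
  [("1","1"),("2","2"),("3","3"),("4","4"),("5","5"),("6","6"),("7","7"),("8","8"),("9","9")]

def pvTokens : List (String × String) := pvDigitPairs ++ pvNumbers

def bestStep (line : String) (best : Option (Int × String)) (tv : String × String) :
    Option (Int × String) :=
  let i := PySem.Str.find line tv.1
  if i = -1 then best
  else match best with
    | none => some (i, tv.2)
    | some (j, v) => if i < j then some (i, tv.2) else some (j, v)

def read_left_alt (line : String) : Option (String × Int) :=
  match pvTokens.foldl (bestStep line) none with
  | none => none
  | some (j, v) => some (v, j + 1)

-- ===== PRECONDITION & SPEC =====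
def Spec_read_left (line : String) (out : Option (String × Int)) : Prop := out = read_left_alt line
instance (line : String) (out : Option (String × Int)) : Decidable (Spec_read_left line out) := by unfold Spec_read_left; infer_instance

-- ===== CLAIM (what is proved, stated in full; the proofs are below) =====
def Claim_equal_read_left : Prop := ∀ (line : String), Dom_read_left line → Spec_read_left line (read_left line)

-- ===== LEMMAS AND PROOFS =====

-- char-level token list (same order as pvTokens / A's checks: digits, then the nine words)
def toksC : List (List Char × String) := pvTokens.map (fun tv => (tv.1.toList, tv.2))

def hitAt (u : List Char) : Option String :=
  (toksC.find? (fun tv => decide (tv.1 <+: u))).map (·.2)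

def firstHit : List Char → Option (String × Nat)
  | [] => none
  | c :: t =>
    match hitAt (c :: t) with
    | some v => some (v, 0)
    | none => (firstHit t).map (fun p => (p.1, p.2 + 1))

def stepC (t : List Char) (best : Option (Int × String)) (tv : List Char × String) :
    Option (Int × String) :=
  let i := PySem.Chars.find t tv.1
  if i = -1 then best
  else match best with
    | none => some (i, tv.2)
    | some (j, v) => if i < j then some (i, tv.2) else some (j, v)

-- find is the least index at which sub is a prefix of the corresponding drop
lemma find_eq_coe (u sub : List Char) (k : Nat) (h1 : sub <+: u.drop k)
    (h2 : ∀ i < k, ¬ sub <+: u.drop i) : PySem.Chars.find u sub = (k : Int) := by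
  have hinf : sub <:+: u := h1.isInfix.trans (List.drop_suffix k u).isInfix
  have hnn : 0 ≤ PySem.Chars.find u sub := (PySem.Chars.find_nonneg_iff u sub).mpr hinf
  obtain ⟨hp, hmin⟩ := PySem.Chars.find_spec hnn
  rcases Nat.lt_trichotomy (PySem.Chars.find u sub).toNat k with h | h | h
  · exact absurd hp (h2 _ h)
  · omega
  · exact absurd h1 (hmin _ h)

lemma find_cons (c : Char) (t sub : List Char) :
    PySem.Chars.find (c :: t) sub =
      if sub <+: (c :: t) then 0
      else if PySem.Chars.find t sub = -1 then -1 else PySem.Chars.find t sub + 1 := by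
  split_ifs with h0 hm
  · exact find_eq_coe _ _ 0 (by simpa using h0) (by omega)
  · rw [PySem.Chars.find_eq_neg_one_iff] at hm ⊢
    intro hinf
    rw [← PySem.Chars.isIn_iff_infix, ← PySem.Chars.exists_prefix_drop_iff_isIn] at hinf
    obtain ⟨j, hj⟩ := hinf
    rcases j with _ | j
    · exact h0 (by simpa using hj)
    · exact hm (hj.isInfix.trans (List.drop_suffix j t).isInfix)
  · have hnn : 0 ≤ PySem.Chars.find t sub := by
      have := PySem.Chars.neg_one_le_find t sub; omega
    obtain ⟨hp, hmin⟩ := PySem.Chars.find_spec hnn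
    have : PySem.Chars.find (c :: t) sub = ((PySem.Chars.find t sub).toNat + 1 : Nat) := by
      apply find_eq_coe
      · simpa using hp
      · intro i hi
        rcases i with _ | i
        · simpa using h0
        · exact hmin i (by omega)
    omega

-- no token of toksC is a prefix of another, so at most one matches at any position
lemma toks_uniq (u : List Char) : ∀ tv ∈ toksC, ∀ tv' ∈ toksC,
    tv.1 <+: u → tv'.1 <+: u → tv = tv' := by
  have hcmp : ∀ tv ∈ toksC, ∀ tv' ∈ toksC, tv.1 <+: tv'.1 → tv = tv' := by decide
  intro tv htv tv' htv' h h'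
  rcases List.prefix_or_prefix_of_prefix h h' with hc | hc
  · exact hcmp tv htv tv' htv' hc
  · exact (hcmp tv' htv' tv htv hc).symm

lemma fold_stay (t : List Char) (w : String) (L : List (List Char × String)) :
    L.foldl (stepC t) (some ((0 : Int), w)) = some ((0 : Int), w) := by
  induction L with
  | nil => rfl
  | cons tv rest ih =>
    have hge := PySem.Chars.neg_one_le_find t tv.1
    simp only [List.foldl_cons, stepC]
    split_ifs with h1 h2
    · exact ih
    · omega
    · exact ih

lemma fold_hit (c : Char) (t : List Char) (tv0 : List Char × String)
    (hpre : tv0.1 <+: (c :: t)) :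
    ∀ L : List (List Char × String), (∀ tv ∈ L, tv.1 <+: (c :: t) → tv = tv0) → tv0 ∈ L →
    ∀ acc : Option (Int × String), (acc = none ∨ ∃ j v, acc = some (j, v) ∧ (0 : Int) < j) →
    L.foldl (stepC (c :: t)) acc = some ((0 : Int), tv0.2) := by
  intro L
  induction L with
  | nil => intro _ hmem; exact absurd hmem (by simp)
  | cons tv rest ih =>
    intro huniq hmem acc hacc
    by_cases heq : tv = tv0
    · subst heq
      have hfind : PySem.Chars.find (c :: t) tv.1 = 0 :=
        find_eq_coe _ _ 0 (by simpa using hpre) (by omega)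
      have hstep : stepC (c :: t) acc tv = some ((0 : Int), tv.2) := by
        rcases hacc with rfl | ⟨j, v, rfl, hj⟩
        · simp [stepC, hfind]
        · simp [stepC, hfind, hj]
      rw [List.foldl_cons, hstep, fold_stay]
    · have hmem' : tv0 ∈ rest := by
        rcases List.mem_cons.mp hmem with h | h
        · exact absurd h.symm heq
        · exact h
      have hnp : ¬ tv.1 <+: (c :: t) := fun h => heq (huniq tv (by simp) h)
      rw [List.foldl_cons]
      apply ih (fun tv' h' => huniq tv' (by simp [h'])) hmem'
      by_cases h1 : PySem.Chars.find t tv.1 = -1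
      · have hs : stepC (c :: t) acc tv = acc := by
          simp [stepC, find_cons, hnp, h1]
        rw [hs]; exact hacc
      · have hge := PySem.Chars.neg_one_le_find t tv.1
        have hpos : (0:Int) < PySem.Chars.find t tv.1 + 1 := by omega
        have h2 : PySem.Chars.find t tv.1 + 1 ≠ -1 := by omega
        rcases hacc with rfl | ⟨j, v, rfl, hj⟩
        · have hs : stepC (c :: t) none tv = some (PySem.Chars.find t tv.1 + 1, tv.2) := by
            simp [stepC, find_cons, hnp, h1, h2]
          rw [hs]; exact Or.inr ⟨_, _, rfl, hpos⟩
        · by_cases hlt : PySem.Chars.find t tv.1 + 1 < j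
          · have hs : stepC (c :: t) (some (j, v)) tv = some (PySem.Chars.find t tv.1 + 1, tv.2) := by
              simp [stepC, find_cons, hnp, h1, h2, hlt]
            rw [hs]; exact Or.inr ⟨_, _, rfl, hpos⟩
          · have hs : stepC (c :: t) (some (j, v)) tv = some (j, v) := by
              simp [stepC, find_cons, hnp, h1, h2, hlt]
            rw [hs]; exact Or.inr ⟨j, v, rfl, hj⟩

lemma fold_shift (c : Char) (t : List Char) :
    ∀ L : List (List Char × String), (∀ tv ∈ L, ¬ tv.1 <+: (c :: t)) →
    ∀ acc : Option (Int × String),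
    L.foldl (stepC (c :: t)) (Option.map (fun p => (p.1 + 1, p.2)) acc) =
      Option.map (fun p => (p.1 + 1, p.2)) (L.foldl (stepC t) acc) := by
  intro L
  induction L with
  | nil => intro _ acc; rfl
  | cons tv rest ih =>
    intro hno acc
    have hnp : ¬ tv.1 <+: (c :: t) := hno tv (by simp)
    have hrest : ∀ tv' ∈ rest, ¬ tv'.1 <+: (c :: t) := fun tv' h => hno tv' (by simp [h])
    rw [List.foldl_cons, List.foldl_cons]
    have hstep : stepC (c :: t) (Option.map (fun p => (p.1 + 1, p.2)) acc) tv =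
        Option.map (fun p => (p.1 + 1, p.2)) (stepC t acc tv) := by
      by_cases h1 : PySem.Chars.find t tv.1 = -1
      · rcases acc with _ | ⟨j, v⟩ <;> simp [stepC, find_cons, hnp, h1]
      · have hge := PySem.Chars.neg_one_le_find t tv.1
        have h2 : PySem.Chars.find t tv.1 + 1 ≠ -1 := by omega
        rcases acc with _ | ⟨j, v⟩
        · simp [stepC, find_cons, hnp, h1, h2]
        · by_cases hlt : PySem.Chars.find t tv.1 < j
          · have hlt' : PySem.Chars.find t tv.1 + 1 < j + 1 := by omega
            simp [stepC, find_cons, hnp, h1, h2, hlt, hlt']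
          · have hlt' : ¬ (PySem.Chars.find t tv.1 + 1 < j + 1) := by omega
            simp [stepC, find_cons, hnp, h1, h2, hlt, hlt']
    rw [hstep, ih hrest]

lemma bestC_eq (t : List Char) :
    toksC.foldl (stepC t) none = (firstHit t).map (fun p => ((p.2 : Int), p.1)) := by
  induction t with
  | nil => decide
  | cons c t ih =>
    cases h : hitAt (c :: t) with
    | some v =>
      obtain ⟨tv0, hfind, hv⟩ := Option.map_eq_some_iff.mp h
      have hmem : tv0 ∈ toksC := List.mem_of_find?_eq_some hfind
      have hp : tv0.1 <+: (c :: t) := by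
        have := List.find?_some hfind; simpa using this
      have huniq : ∀ tv ∈ toksC, tv.1 <+: (c :: t) → tv = tv0 := fun tv htv hpre =>
        toks_uniq (c :: t) tv htv tv0 hmem hpre hp
      rw [fold_hit c t tv0 hp toksC huniq hmem none (Or.inl rfl)]
      simp [firstHit, h, hv]
    | none =>
      have hno : ∀ tv ∈ toksC, ¬ tv.1 <+: (c :: t) := by
        intro tv htv hpre
        have := List.find?_eq_none.mp (Option.map_eq_none_iff.mp h) tv htv
        simp at this; exact this hpre
      have := fold_shift c t toksC hno none
      simp only [Option.map_none] at this
      rw [this, ih]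
      simp only [firstHit, h]
      cases firstHit t with
      | none => rfl
      | some p => simp

lemma slice_eq_iff_prefix (line : String) (idx : Nat) (k : String) :
    (PySem.Str.slice line (some (idx : Int)) (some ((idx : Int) + (PySem.Str.len k : Int))) = k)
      ↔ k.toList <+: line.toList.drop idx := by
  have hs : (PySem.Str.slice line (some (idx : Int)) (some ((idx : Int) + (PySem.Str.len k : Int)))).toList
      = (line.toList.drop idx).take k.toList.length := by
    have : ((idx : Int) + (PySem.Str.len k : Int)) = ((idx + k.toList.length : Nat) : Int) := by
      simp [pysem]
    rw [this]
    simp [pysem]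
  rw [← String.toList_inj, hs, List.prefix_iff_eq_take, eq_comm]

lemma alphaGo_eq (line : String) (idx : Nat) (L : List (String × String)) :
    isAlphaGo line (idx : Int) true L =
      ((L.map (fun tv => (tv.1.toList, tv.2))).find?
        (fun tv => decide (tv.1 <+: line.toList.drop idx))).map (·.2) := by
  induction L with
  | nil => rfl
  | cons tv rest ih =>
    obtain ⟨k, v⟩ := tv
    simp only [isAlphaGo, if_true, List.map_cons, List.find?_cons]
    by_cases h : k.toList <+: line.toList.drop idx
    · rw [if_pos ((slice_eq_iff_prefix line idx k).mpr h)]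
      simp [h]
    · rw [if_neg (fun he => h ((slice_eq_iff_prefix line idx k).mp he))]
      simp [h, ih]

lemma digit_find? (c : Char) (rest : List Char) :
    ((pvDigitPairs.map (fun tv => (tv.1.toList, tv.2))).find?
        (fun tv => decide (tv.1 <+: c :: rest))) =
      if c ∈ pvDigits then some ([c], String.ofList [c]) else none := by
  have hmap : pvDigitPairs.map (fun tv => (tv.1.toList, tv.2)) =
      [(['1'],"1"),(['2'],"2"),(['3'],"3"),(['4'],"4"),(['5'],"5"),
       (['6'],"6"),(['7'],"7"),(['8'],"8"),(['9'],"9")] := by decide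
  rw [hmap]
  by_cases h : c ∈ pvDigits
  · simp only [pvDigits, List.mem_cons, List.not_mem_nil, or_false] at h
    rcases h with rfl | rfl | rfl | rfl | rfl | rfl | rfl | rfl | rfl <;>
      simp [pvDigits, List.find?, List.cons_prefix_cons]
  · rw [if_neg h]
    rw [List.find?_eq_none]
    intro tv htv
    simp only [List.mem_cons, List.not_mem_nil, or_false] at htv
    rcases htv with rfl | rfl | rfl | rfl | rfl | rfl | rfl | rfl | rfl <;>
      · simp only [List.cons_prefix_cons, decide_eq_true_eq, not_and]
        rintro rfl
        simp [pvDigits] at h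

lemma hitAt_cons (c : Char) (u : List Char) :
    hitAt (c :: u) =
      if c ∈ pvDigits then some (String.ofList [c])
      else ((pvNumbers.map (fun tv => (tv.1.toList, tv.2))).find?
        (fun tv => decide (tv.1 <+: c :: u))).map (·.2) := by
  unfold hitAt toksC pvTokens
  rw [List.map_append, List.find?_append, digit_find?]
  split_ifs with h
  · simp
  · simp

lemma readLeftGo_eq (line : String) (idx : Nat) :
    readLeftGo line idx =
      (firstHit (line.toList.drop idx)).map (fun p => (p.1, (idx : Int) + (p.2 : Int) + 1)) := by
  by_cases h : line.toList.length ≤ idx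
  · rw [readLeftGo, dif_pos h, List.drop_of_length_le h]
    rfl
  · rw [readLeftGo, dif_neg h]
    have hlt : idx < line.toList.length := by omega
    have hd : line.toList.drop idx = line.toList[idx] :: line.toList.drop (idx + 1) :=
      List.drop_eq_getElem_cons hlt
    rw [hd]
    simp only [firstHit]
    rw [hitAt_cons]
    by_cases hc : line.toList[idx] ∈ pvDigits
    · rw [if_pos hc]
      simp [hc]
    · rw [if_neg hc]
      simp only [hc, if_false]
      have halpha := alphaGo_eq line idx pvNumbers
      rw [← hd] at *
      simp only [is_alpha_number, alphaGo_eq]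
      cases hfa : ((pvNumbers.map (fun tv => (tv.1.toList, tv.2))).find?
          (fun tv => decide (tv.1 <+: line.toList.drop idx))).map (fun x => x.2) with
      | some a => simp
      | none =>
        rw [readLeftGo_eq line (idx + 1)]
        cases firstHit (line.toList.drop (idx + 1)) with
        | none => rfl
        | some p => simp; ring
  termination_by line.toList.length - idx
  decreasing_by
    have h2 : line.toList.length = line.length := String.length_toList
    omega

lemma alt_eq (line : String) :
    read_left_alt line =
      (firstHit line.toList).map (fun p => (p.1, (p.2 : Int) + 1)) := by
  have hfun : bestStep line = fun acc tv => stepC line.toList acc (tv.1.toList, tv.2) := by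
    funext acc tv
    simp [bestStep, stepC, pysem]
  have hb : pvTokens.foldl (bestStep line) none = toksC.foldl (stepC line.toList) none := by
    rw [toksC, List.foldl_map, hfun]
  rw [read_left_alt, hb, bestC_eq]
  cases firstHit line.toList with
  | none => rfl
  | some p => rfl

-- ===== VERDICT (by name: the statement is the Claim_ definition above) =====
theorem read_left_spec : Claim_equal_read_left := by
  intro line _
  unfold Spec_read_left
  rw [read_left, readLeftGo_eq, alt_eq, List.drop_zero]
  cases firstHit line.toList with
  | none => rfl
  | some p => simp
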